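-- pv_equiv track=rewrite | github.com/tycyd/codeforces | brute force/1399C Boats Competition.py | boats_competition
-- ===== SOURCE A (Python) =====
-- def boats_competition(n, w_a):
--
--     ans = 0
--     for i in range(2, 101):
--         cnt = 0
--         dic = {}
--         for w in w_a:
--             if (i - w) in dic and dic[i-w] > 0:
--                 cnt += 1
--                 dic[i - w] -= 1
--             else:
--                 if w not in dic:
--                     dic[w] = 1
--                 else:
--                     dic[w] += 1
--
--         ans = max(ans, cnt)
--
--     return ans
-- ===== SOURCE B (Python) =====
-- def boats_competition(n, w_a):
--     freq = {}
--     for w in w_a: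
--         freq[w] = freq.get(w, 0) + 1
--     ans = 0
--     for i in range(2, 101):
--         cnt = 0
--         for w, c in freq.items():
--             if 2 * w < i:
--                 cnt += min(c, freq.get(i - w, 0))
--             elif 2 * w == i:
--                 cnt += c // 2
--         ans = max(ans, cnt)
--     return ans
-- ===== Notes on version B (the rewrite author's own statement) =====
-- stated objective: simpler
-- what changed: B builds one frequency table of the weights and, for each candidate sum, derives the pair count arithmetically (min of the two complements' frequencies, floor-half for the self-complement) instead of re-running A's greedy matching dict over all boats for every sum.
import Mathlib
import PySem

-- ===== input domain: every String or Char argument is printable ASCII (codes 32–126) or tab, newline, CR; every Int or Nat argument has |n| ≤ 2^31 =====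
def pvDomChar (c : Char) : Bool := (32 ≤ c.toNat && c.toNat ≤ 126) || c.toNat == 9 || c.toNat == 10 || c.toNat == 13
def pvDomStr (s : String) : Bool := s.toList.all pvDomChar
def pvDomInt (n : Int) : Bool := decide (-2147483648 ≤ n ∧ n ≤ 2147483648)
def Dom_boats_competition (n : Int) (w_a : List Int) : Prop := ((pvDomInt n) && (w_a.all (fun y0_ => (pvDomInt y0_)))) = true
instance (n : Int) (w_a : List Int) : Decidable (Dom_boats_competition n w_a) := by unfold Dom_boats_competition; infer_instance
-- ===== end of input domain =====

-- B replaces A's per-sum greedy pairing pass over all boats by one frequency table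
-- and an arithmetic pair count per sum (objective: simpler).

-- ===== PORT A =====
-- one iteration of A's inner 'for w in w_a' loop (state: cnt, dic)
def boatsStep (i : Int) (s : Int × PySem.Dict Int Int) (w : Int) : Int × PySem.Dict Int Int :=
  -- 'if (i - w) in dic and dic[i-w] > 0'; dic[i-w] after the membership test is getD
  if s.2.contains (i - w) && decide (0 < s.2.getD (i - w) 0) then
    (s.1 + 1, s.2.insert (i - w) (s.2.getD (i - w) 0 - 1))
  else
    -- 'if w not in dic: dic[w] = 1 else: dic[w] += 1'
    if s.2.contains w = false then (s.1, s.2.insert w 1)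
    else (s.1, s.2.insert w (s.2.getD w 0 + 1))

def boats_competition (n : Int) (w_a : List Int) : Int :=
  (PySem.List.pyRange 2 101 1).foldl (fun ans i =>
    max ans (w_a.foldl (boatsStep i) (0, PySem.Dict.empty)).1) 0

-- ===== PORT B =====
-- pair count for sum i derived from the frequency table (B's inner 'for w, c in freq.items()')
def boatsAltCnt (freq : PySem.Dict Int Int) (i : Int) : Int :=
  freq.items.foldl (fun cnt wc =>
    if 2 * wc.1 < i then cnt + min wc.2 (freq.getD (i - wc.1) 0)
    else if 2 * wc.1 = i then cnt + PySem.Int.floordiv wc.2 2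
    else cnt) 0

def boats_competition_alt (n : Int) (w_a : List Int) : Int :=
  let freq := w_a.foldl (fun (d : PySem.Dict Int Int) w => d.insert w (d.getD w 0 + 1)) PySem.Dict.empty
  (PySem.List.pyRange 2 101 1).foldl (fun ans i => max ans (boatsAltCnt freq i)) 0

-- ===== PRECONDITION & SPEC =====
def Spec_boats_competition (n : Int) (w_a : List Int) (out : Int) : Prop := out = boats_competition_alt n w_a
instance (n : Int) (w_a : List Int) (out : Int) : Decidable (Spec_boats_competition n w_a out) := by unfold Spec_boats_competition; infer_instance

-- ===== CLAIM (what is proved, stated in full; the proofs are below) =====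
def Claim_equal_boats_competition : Prop := ∀ (n : Int) (w_a : List Int), Dom_boats_competition n w_a → Spec_boats_competition n w_a (boats_competition n w_a)

-- ===== LEMMAS AND PROOFS =====

-- number of occurrences of v, as an Int
def pvCnt (l : List Int) (v : Int) : Int := (l.count v : Int)

-- contribution of the value v to the pair count for sum i (counted once per unordered pair)
def pvT (i : Int) (l : List Int) (v : Int) : Int :=
  if 2 * v < i then min (pvCnt l v) (pvCnt l (i - v))
  else if 2 * v = i then pvCnt l v / 2
  else 0

-- residual (unpaired) occurrences of v after A's greedy pass for sum i
def pvR (i : Int) (l : List Int) (v : Int) : Int :=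
  if 2 * v = i then pvCnt l v % 2 else max 0 (pvCnt l v - pvCnt l (i - v))

-- total pair count for sum i
def pvS (i : Int) (l : List Int) : Int := ∑ v ∈ l.toFinset, pvT i l v

lemma pvCnt_nonneg (l : List Int) (v : Int) : 0 ≤ pvCnt l v := Int.natCast_nonneg _

lemma pvCnt_append (l : List Int) (w v : Int) :
    pvCnt (l ++ [w]) v = pvCnt l v + (if v = w then 1 else 0) := by
  simp [pvCnt, List.count_append, List.count_singleton]
  split <;> split <;> simp_all

lemma pvT_of_count_zero (i : Int) (l : List Int) (v : Int) (h : v ∉ l) :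
    pvT i l v = 0 := by
  have h0 : pvCnt l v = 0 := by simp [pvCnt, List.count_eq_zero_of_not_mem h]
  have := pvCnt_nonneg l (i - v)
  unfold pvT
  split_ifs <;> omega

lemma pvS_superset (i : Int) (l : List Int) (F : Finset Int) (hF : l.toFinset ⊆ F) :
    pvS i l = ∑ v ∈ F, pvT i l v := by
  unfold pvS
  refine Finset.sum_subset hF ?_
  intro x _ hx
  exact pvT_of_count_zero i l x (by simpa using hx)

lemma pvT_append_other (i : Int) (l : List Int) (w v : Int)
    (h1 : v ≠ w) (h2 : v ≠ i - w) : pvT i (l ++ [w]) v = pvT i l v := by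
  have hc1 : pvCnt (l ++ [w]) v = pvCnt l v := by rw [pvCnt_append]; simp [h1]
  have hc2 : pvCnt (l ++ [w]) (i - v) = pvCnt l (i - v) := by
    rw [pvCnt_append]
    have : i - v ≠ w := fun h => h2 (by omega)
    simp [this]
  simp [pvT, hc1, hc2]

-- the sum changes only at the (at most two) values w and i - w
lemma pvS_append (i w : Int) (l : List Int) :
    pvS i (l ++ [w]) = pvS i l +
      (if 2 * w = i then pvT i (l ++ [w]) w - pvT i l w
       else (pvT i (l ++ [w]) w - pvT i l w) + (pvT i (l ++ [w]) (i - w) - pvT i l (i - w))) := by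
  have hFw : l.toFinset ⊆ insert w (insert (i - w) l.toFinset) := by
    intro x hx; simp [hx]
  have hFw' : (l ++ [w]).toFinset ⊆ insert w (insert (i - w) l.toFinset) := by
    intro x hx
    simp only [List.mem_toFinset, List.mem_append, List.mem_singleton] at hx
    rcases hx with h | h
    · exact hFw (List.mem_toFinset.mpr h)
    · simp [h]
  rw [pvS_superset i l _ hFw, pvS_superset i (l ++ [w]) _ hFw']
  have hzero : ∀ v ∈ insert w (insert (i - w) l.toFinset), v ∉ ({w, i - w} : Finset Int) →
      pvT i (l ++ [w]) v - pvT i l v = 0 := by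
    intro v _ hv
    simp only [Finset.mem_insert, Finset.mem_singleton, not_or] at hv
    rw [pvT_append_other i l w v hv.1 hv.2]; ring
  have hsub : ({w, i - w} : Finset Int) ⊆ insert w (insert (i - w) l.toFinset) := by
    intro x hx
    rcases Finset.mem_insert.mp hx with h | h
    · simp [h]
    · simp at h; simp [h]
  have key : ∑ v ∈ insert w (insert (i - w) l.toFinset), (pvT i (l ++ [w]) v - pvT i l v) =
      ∑ v ∈ ({w, i - w} : Finset Int), (pvT i (l ++ [w]) v - pvT i l v) :=
    (Finset.sum_subset hsub hzero).symm
  rw [Finset.sum_sub_distrib] at key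
  by_cases h2 : 2 * w = i
  · have hw : i - w = w := by omega
    rw [hw] at key ⊢
    simp only [show ({w, w} : Finset Int) = {w} from by simp, Finset.sum_singleton] at key
    rw [if_pos h2]
    omega
  · have hw : w ≠ i - w := by omega
    rw [Finset.sum_pair hw] at key
    rw [if_neg h2]
    omega

lemma pvR_nonneg (i : Int) (l : List Int) (v : Int) : 0 ≤ pvR i l v := by
  have := pvCnt_nonneg l v
  unfold pvR
  split_ifs <;> omega

lemma pvCnt_append_self (l : List Int) (w : Int) : pvCnt (l ++ [w]) w = pvCnt l w + 1 := by
  rw [pvCnt_append]; simp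

lemma pvCnt_append_ne (l : List Int) (w v : Int) (h : v ≠ w) : pvCnt (l ++ [w]) v = pvCnt l v := by
  rw [pvCnt_append]; simp [h]

lemma pvR_hit_delta (i : Int) (l : List Int) (w : Int) (h : 0 < pvR i l (i - w)) :
    (if 2 * w = i then pvT i (l ++ [w]) w - pvT i l w
     else (pvT i (l ++ [w]) w - pvT i l w) + (pvT i (l ++ [w]) (i - w) - pvT i l (i - w))) = 1 := by
  have hc := pvCnt_nonneg l w
  have hc2 := pvCnt_nonneg l (i - w)
  by_cases h2 : 2 * w = i
  · have hw : i - w = w := by omega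
    rw [hw] at h
    unfold pvR at h
    rw [if_pos h2] at h
    rw [if_pos h2]
    unfold pvT
    rw [hw, pvCnt_append_self]
    split_ifs <;> omega
  · have hw : i - w ≠ w := by omega
    have hww : i - (i - w) = w := by omega
    unfold pvR at h
    rw [if_neg (by omega), hww] at h
    rw [if_neg h2]
    unfold pvT
    rw [hww, pvCnt_append_self, pvCnt_append_ne l w _ hw]
    split_ifs <;> omega

lemma pvR_hit_self (i : Int) (l : List Int) (w : Int) (h : 0 < pvR i l (i - w)) :
    pvR i (l ++ [w]) (i - w) = pvR i l (i - w) - 1 := by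
  by_cases h2 : 2 * w = i
  · have hw : i - w = w := by omega
    rw [hw] at h ⊢
    unfold pvR at h ⊢
    rw [if_pos h2] at h ⊢
    rw [pvCnt_append_self]
    omega
  · have hw : i - w ≠ w := by omega
    have hww : i - (i - w) = w := by omega
    unfold pvR at h ⊢
    rw [if_neg (by omega), hww] at h ⊢
    rw [pvCnt_append_self, pvCnt_append_ne l w _ hw]
    omega

lemma pvR_hit_other (i : Int) (l : List Int) (w v : Int) (hv : v ≠ i - w)
    (h : 0 < pvR i l (i - w)) : pvR i (l ++ [w]) v = pvR i l v := by
  by_cases hvw : v = w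
  · subst hvw
    have h2 : 2 * v ≠ i := by omega
    have hww : i - (i - v) = v := by omega
    unfold pvR at h ⊢
    rw [if_neg (by omega), hww] at h
    rw [if_neg h2, if_neg h2, pvCnt_append_self, pvCnt_append_ne l v _ (by omega : i - v ≠ v)]
    omega
  · have hiv : i - v ≠ w := by intro h'; exact hv (by omega)
    unfold pvR
    rw [pvCnt_append_ne l w _ hvw, pvCnt_append_ne l w _ hiv]

lemma pvR_miss_delta (i : Int) (l : List Int) (w : Int) (h : pvR i l (i - w) = 0) :
    (if 2 * w = i then pvT i (l ++ [w]) w - pvT i l w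
     else (pvT i (l ++ [w]) w - pvT i l w) + (pvT i (l ++ [w]) (i - w) - pvT i l (i - w))) = 0 := by
  have hc := pvCnt_nonneg l w
  have hc2 := pvCnt_nonneg l (i - w)
  by_cases h2 : 2 * w = i
  · have hw : i - w = w := by omega
    rw [hw] at h
    unfold pvR at h
    rw [if_pos h2] at h
    rw [if_pos h2]
    unfold pvT
    rw [hw, pvCnt_append_self]
    split_ifs <;> omega
  · have hw : i - w ≠ w := by omega
    have hww : i - (i - w) = w := by omega
    unfold pvR at h
    rw [if_neg (by omega), hww] at h
    rw [if_neg h2]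
    unfold pvT
    rw [hww, pvCnt_append_self, pvCnt_append_ne l w _ hw]
    split_ifs <;> omega

lemma pvR_miss_self (i : Int) (l : List Int) (w : Int) (h : pvR i l (i - w) = 0) :
    pvR i (l ++ [w]) w = pvR i l w + 1 := by
  have hc := pvCnt_nonneg l w
  by_cases h2 : 2 * w = i
  · have hw : i - w = w := by omega
    rw [hw] at h
    unfold pvR at h ⊢
    rw [if_pos h2] at h ⊢
    rw [pvCnt_append_self]
    omega
  · have hw : i - w ≠ w := by omega
    have hww : i - (i - w) = w := by omega
    unfold pvR at h ⊢
    rw [if_neg (by omega), hww] at h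
    rw [if_neg h2, if_neg h2, pvCnt_append_self, pvCnt_append_ne l w _ hw]
    omega

lemma pvR_miss_other (i : Int) (l : List Int) (w v : Int) (hv : v ≠ w)
    (h : pvR i l (i - w) = 0) : pvR i (l ++ [w]) v = pvR i l v := by
  by_cases hvw : v = i - w
  · subst hvw
    have h2 : 2 * w ≠ i := by intro h'; exact hv (by omega)
    have hww : i - (i - w) = w := by omega
    unfold pvR at h ⊢
    rw [if_neg (by omega), hww] at h ⊢
    rw [pvCnt_append_ne l w _ hv, pvCnt_append_self]
    omega
  · have hiv : i - v ≠ w := by intro h'; exact hvw (by omega)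
    unfold pvR
    rw [pvCnt_append_ne l w _ hv, pvCnt_append_ne l w _ hiv]

-- A's greedy inner loop: cnt is the pair count, dic holds the residuals
lemma boats_inner_inv (i : Int) (l : List Int) :
    (l.foldl (boatsStep i) (0, PySem.Dict.empty)).1 = pvS i l ∧
    ∀ v, ((l.foldl (boatsStep i) (0, PySem.Dict.empty)).2).getD v 0 = pvR i l v := by
  induction l using List.reverseRecOn with
  | nil =>
    constructor
    · simp [pvS]
    · intro v
      simp [PySem.Dict.getD_empty, pvR, pvCnt]
  | append_singleton l w ih =>
    obtain ⟨ih1, ih2⟩ := ih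
    rw [List.foldl_append]
    simp only [List.foldl_cons, List.foldl_nil]
    set st := l.foldl (boatsStep i) (0, PySem.Dict.empty) with hst
    have hcond : (st.2.contains (i - w) && decide (0 < st.2.getD (i - w) 0)) =
        decide (0 < pvR i l (i - w)) := by
      by_cases hc : st.2.contains (i - w) = true
      · rw [hc, ih2]
        simp
      · have hc' : st.2.contains (i - w) = false := by simpa using hc
        rw [← ih2 (i - w), hc', PySem.Dict.getD_of_not_contains st.2 0 hc']
        simp
    unfold boatsStep
    rw [hcond]
    by_cases hhit : 0 < pvR i l (i - w)
    · rw [if_pos (by simpa using hhit)]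
      refine ⟨?_, ?_⟩
      · simp only [ih1]
        rw [pvS_append]
        have := pvR_hit_delta i l w hhit
        omega
      · intro v
        simp only [PySem.Dict.getD_insert, ih2]
        split_ifs with hv
        · rw [hv, pvR_hit_self i l w hhit]
        · rw [pvR_hit_other i l w v hv hhit]
    · rw [if_neg (by simpa using hhit)]
      have hmiss : pvR i l (i - w) = 0 := by
        have := pvR_nonneg i l (i - w); omega
      have hmain : ∀ (d : PySem.Dict Int Int), (∀ v, d.getD v 0 = pvR i l v) →
          ∀ v, (d.insert w (pvR i l w + 1)).getD v 0 = pvR i (l ++ [w]) v := by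
        intro d hd v
        rw [PySem.Dict.getD_insert]
        split_ifs with hv
        · rw [hv, pvR_miss_self i l w hmiss]
        · rw [hd, pvR_miss_other i l w v hv hmiss]
      have hcnt : st.1 = pvS i (l ++ [w]) := by
        rw [ih1, pvS_append]
        have := pvR_miss_delta i l w hmiss
        omega
      by_cases hcw : st.2.contains w
      · rw [if_neg (by simp [hcw])]
        exact ⟨hcnt, by rw [ih2 w]; exact hmain st.2 ih2⟩
      · have hcw' : st.2.contains w = false := by simpa using hcw
        rw [if_pos hcw']
        refine ⟨hcnt, ?_⟩
        have hw0 : pvR i l w = 0 := by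
          rw [← ih2 w, PySem.Dict.getD_of_not_contains st.2 0 hcw']
        have := hmain st.2 ih2
        rw [hw0] at this
        simpa using this

-- B's inner loop computes the same pair count
lemma boatsAltCnt_eq (i : Int) (l : List Int) :
    boatsAltCnt (PySem.Dict.counter l) i = pvS i l := by
  unfold boatsAltCnt
  rw [PySem.Dict.items_counter]
  rw [List.foldl_map]
  have hfun : ∀ (cnt v : Int),
      (fun (cnt : Int) (wc : Int × Int) =>
        if 2 * wc.1 < i then cnt + min wc.2 ((PySem.Dict.counter l).getD (i - wc.1) 0)
        else if 2 * wc.1 = i then cnt + PySem.Int.floordiv wc.2 2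
        else cnt) cnt (v, (l.count v : Int)) = cnt + pvT i l v := by
    intro cnt v
    simp only [PySem.Dict.getD_counter, pvT, pvCnt]
    split_ifs with h1 h2
    · rfl
    · rw [PySem.Int.floordiv_eq_ediv_of_pos (by omega)]
    · ring
  calc (PySem.Set.ofList l).foldl (fun cnt v =>
        (fun (cnt : Int) (wc : Int × Int) =>
          if 2 * wc.1 < i then cnt + min wc.2 ((PySem.Dict.counter l).getD (i - wc.1) 0)
          else if 2 * wc.1 = i then cnt + PySem.Int.floordiv wc.2 2
          else cnt) cnt (v, (l.count v : Int))) 0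
      = (PySem.Set.ofList l).foldl (fun cnt v => cnt + pvT i l v) 0 := by
        congr 1; funext cnt v; exact hfun cnt v
    _ = 0 + ((PySem.Set.ofList l).map (pvT i l)).sum := PySem.List.foldl_add _ _ _
    _ = pvS i l := by
        rw [zero_add, ← List.sum_toFinset _ (PySem.Set.nodup_ofList l)]
        unfold pvS
        apply Finset.sum_congr _ (fun _ _ => rfl)
        ext x
        simp [PySem.Set.mem_ofList]

-- ===== VERDICT (by name: the statement is the Claim_ definition above) =====
theorem boats_competition_spec : Claim_equal_boats_competition := by
  intro n w_a _
  unfold Spec_boats_competition boats_competition boats_competition_alt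
  rw [PySem.Dict.foldl_insert_getD_add_one_eq_counter]
  congr 1
  funext ans i
  rw [(boats_inner_inv i w_a).1, boatsAltCnt_eq]
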